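-- pv_equiv track=rewrite | github.com/odin2-hash/salto-agent | agent.py | extract_search_parameters
-- ===== SOURCE A (Python) =====
-- from typing import Dict, Any, List
--
-- def extract_search_parameters(query: str) -> Dict[str, Any]:
--     """
--     Extract search parameters from natural language query.
--
--     Args:
--         query: Natural language search query
--
--     Returns:
--         Dictionary with extracted parameters
--     """
--     params = {}
--     query_lower = query.lower()
--
--     # Extract country mentions
--     eu_countries = [
--         "germany", "france", "spain", "italy", "poland", "netherlands",
--         "belgium", "greece", "portugal", "czech", "hungary", "sweden",
--         "austria", "denmark", "finland", "ireland", "latvia", "lithuania",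
--         "luxembourg", "malta", "slovakia", "slovenia", "estonia", "croatia",
--         "cyprus", "bulgaria", "romania"
--     ]
--
--     for country in eu_countries:
--         if country in query_lower:
--             params["country"] = country.title()
--             break
--
--     # Extract project types
--     project_types = ["ka152", "ka153", "ka154", "ka210", "ka220", "ka226"]
--     for pt in project_types:
--         if pt in query_lower:
--             params["project_type"] = pt.upper()
--             break
--
--     # Extract common themes
--     if any(word in query_lower for word in ["digital", "technology", "tech"]):
--         params["theme"] = "Digital skills"
--     elif any(word in query_lower for word in ["environment", "green", "climate"]):
--         params["theme"] = "Environment"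
--     elif any(word in query_lower for word in ["inclusion", "inclusive", "disability"]):
--         params["theme"] = "Social inclusion"
--
--     # Extract target groups
--     if any(word in query_lower for word in ["youth worker", "trainer"]):
--         params["target_group"] = "Youth workers"
--     elif "young people" in query_lower:
--         params["target_group"] = "Young people"
--     elif "teacher" in query_lower:
--         params["target_group"] = "Teachers"
--
--     return params
-- ===== SOURCE B (Python) =====
-- # Different algorithm: instead of testing each keyword with `kw in query` (A's
-- # per-keyword substring scans), B makes ONE pass over the positions of the
-- # lowered query, looks up each window in a hash index keyword -> table row,
-- # collects the set of matched rows, then resolves each field from that set by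
-- # taking its first row in table order.
--
-- _TABLE = (
--     [("country", c, c.title()) for c in [
--         "germany", "france", "spain", "italy", "poland", "netherlands",
--         "belgium", "greece", "portugal", "czech", "hungary", "sweden",
--         "austria", "denmark", "finland", "ireland", "latvia", "lithuania",
--         "luxembourg", "malta", "slovakia", "slovenia", "estonia", "croatia",
--         "cyprus", "bulgaria", "romania"]]
--     + [("project_type", p, p.upper()) for p in
--        ["ka152", "ka153", "ka154", "ka210", "ka220", "ka226"]]
--     + [("theme", w, "Digital skills") for w in ["digital", "technology", "tech"]]
--     + [("theme", w, "Environment") for w in ["environment", "green", "climate"]]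
--     + [("theme", w, "Social inclusion") for w in ["inclusion", "inclusive", "disability"]]
--     + [("target_group", w, "Youth workers") for w in ["youth worker", "trainer"]]
--     + [("target_group", "young people", "Young people")]
--     + [("target_group", "teacher", "Teachers")]
-- )
--
-- _INDEX = {kw: j for j, (_f, kw, _v) in enumerate(_TABLE)}
-- _LENGTHS = sorted({len(kw) for kw in _INDEX})
--
--
-- def extract_search_parameters(query: str):
--     q = query.lower()
--     matched = set()
--     for i in range(len(q)):
--         for L in _LENGTHS:
--             j = _INDEX.get(q[i:i + L])
--             if j is not None:
--                 matched.add(j)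
--     params = {}
--     for j, (field, _kw, value) in enumerate(_TABLE):
--         if j in matched and field not in params:
--             params[field] = value
--     return params
-- ===== Notes on version B (the rewrite author's own statement) =====
-- stated objective: alternative
-- what changed: Instead of testing each keyword with a substring scan (`kw in query`) per field, B makes one pass over the positions of the lowered query, looks each window up in a hash index keyword->table row, collects the set of matched rows, and then resolves each field as its first matched row in table order.
import Mathlib
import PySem

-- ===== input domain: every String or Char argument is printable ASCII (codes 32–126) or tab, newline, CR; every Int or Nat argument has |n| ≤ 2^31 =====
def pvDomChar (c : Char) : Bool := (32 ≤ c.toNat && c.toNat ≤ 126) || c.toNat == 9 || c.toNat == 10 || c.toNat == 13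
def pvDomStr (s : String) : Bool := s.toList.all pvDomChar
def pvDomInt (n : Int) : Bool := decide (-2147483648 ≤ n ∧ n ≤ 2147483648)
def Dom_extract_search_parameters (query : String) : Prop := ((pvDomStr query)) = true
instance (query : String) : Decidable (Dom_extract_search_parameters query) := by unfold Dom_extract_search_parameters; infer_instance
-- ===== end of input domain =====

-- B replaces A's per-keyword substring scans by one pass over the positions of the
-- lowered query with a hash-index lookup of each window, collecting the set of
-- matched table rows, then resolving each field from that set (objective: alternative).

-- str.title(), ported by hand: a letter is uppercased when the previous character is
-- not a letter, lowercased otherwise (exact on ASCII, where 'cased' = alpha).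
def pvTitleGo : List Char → Bool → List Char
  | [], _ => []
  | c :: rest, prevAlpha =>
      (if prevAlpha then PySem.Chars.lowerChar c else PySem.Chars.upperChar c)
        :: pvTitleGo rest (PySem.Chars.isalpha c)

def pvTitle (s : String) : String := String.ofList (pvTitleGo s.toList false)

-- ===== PORT A =====
def pvA_countries : List String :=
  ["germany", "france", "spain", "italy", "poland", "netherlands",
   "belgium", "greece", "portugal", "czech", "hungary", "sweden",
   "austria", "denmark", "finland", "ireland", "latvia", "lithuania",
   "luxembourg", "malta", "slovakia", "slovenia", "estonia", "croatia",
   "cyprus", "bulgaria", "romania"]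

def pvA_projectTypes : List String := ["ka152", "ka153", "ka154", "ka210", "ka220", "ka226"]

-- 'for country in eu_countries: if country in query_lower: …; break'
def pvA_countryLoop (cs : List String) (ql : String)
    (params : PySem.Dict String String) : PySem.Dict String String :=
  match cs with
  | [] => params
  | c :: rest =>
      if PySem.Str.isIn c ql then params.insert "country" (pvTitle c)
      else pvA_countryLoop rest ql params

-- 'for pt in project_types: if pt in query_lower: …; break'
def pvA_ptLoop (ps : List String) (ql : String)
    (params : PySem.Dict String String) : PySem.Dict String String :=
  match ps with
  | [] => params
  | p :: rest =>
      if PySem.Str.isIn p ql then params.insert "project_type" (PySem.Str.upper p)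
      else pvA_ptLoop rest ql params

def extract_search_parameters (query : String) : List (String × String) :=
  let ql := PySem.Str.lower query
  let params : PySem.Dict String String := PySem.Dict.empty
  let params := pvA_countryLoop pvA_countries ql params
  let params := pvA_ptLoop pvA_projectTypes ql params
  let params :=
    if ["digital", "technology", "tech"].any (fun w => PySem.Str.isIn w ql) then
      params.insert "theme" "Digital skills"
    else if ["environment", "green", "climate"].any (fun w => PySem.Str.isIn w ql) then
      params.insert "theme" "Environment"
    else if ["inclusion", "inclusive", "disability"].any (fun w => PySem.Str.isIn w ql) then
      params.insert "theme" "Social inclusion"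
    else params
  let params :=
    if ["youth worker", "trainer"].any (fun w => PySem.Str.isIn w ql) then
      params.insert "target_group" "Youth workers"
    else if PySem.Str.isIn "young people" ql then
      params.insert "target_group" "Young people"
    else if PySem.Str.isIn "teacher" ql then
      params.insert "target_group" "Teachers"
    else params
  params.items

-- ===== PORT B =====
-- the rule table: (field, keyword, value) rows, in A's priority order per field
def pvB_table : List (String × String × String) :=
  (["germany", "france", "spain", "italy", "poland", "netherlands",
    "belgium", "greece", "portugal", "czech", "hungary", "sweden",
    "austria", "denmark", "finland", "ireland", "latvia", "lithuania",
    "luxembourg", "malta", "slovakia", "slovenia", "estonia", "croatia",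
    "cyprus", "bulgaria", "romania"].map (fun c => ("country", c, pvTitle c)))
  ++ (["ka152", "ka153", "ka154", "ka210", "ka220", "ka226"].map
        (fun p => ("project_type", p, PySem.Str.upper p)))
  ++ (["digital", "technology", "tech"].map (fun w => ("theme", w, "Digital skills")))
  ++ (["environment", "green", "climate"].map (fun w => ("theme", w, "Environment")))
  ++ (["inclusion", "inclusive", "disability"].map (fun w => ("theme", w, "Social inclusion")))
  ++ (["youth worker", "trainer"].map (fun w => ("target_group", w, "Youth workers")))
  ++ [("target_group", "young people", "Young people")]
  ++ [("target_group", "teacher", "Teachers")]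

-- _INDEX = {kw: j for j, (_f, kw, _v) in enumerate(_TABLE)}
def pvB_index : PySem.Dict String Int :=
  (PySem.List.enumerate pvB_table 0).foldl (fun d je => d.insert je.2.2.1 je.1) PySem.Dict.empty

-- _LENGTHS = sorted({len(kw) for kw in _INDEX})
def pvB_lengths : List Int :=
  PySem.List.sorted (PySem.Set.ofList (pvB_table.map (fun e => PySem.Str.len e.2.1)))
    (fun x => x) false

-- the scan: for i in range(len(q)): for L in _LENGTHS: j = _INDEX.get(q[i:i+L]); if j is not None: matched.add(j)
def pvB_scan (q : String) : PySem.Set Int :=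
  (PySem.List.pyRange 0 (PySem.Str.len q) 1).foldl
    (fun m i =>
      pvB_lengths.foldl
        (fun m L =>
          match pvB_index.get? (PySem.Str.slice q (some i) (some (i + L))) with
          | some j => m.add j
          | none => m)
        m)
    PySem.Set.empty

def extract_search_parameters_alt (query : String) : List (String × String) :=
  let q := PySem.Str.lower query
  let matched := pvB_scan q
  ((PySem.List.enumerate pvB_table 0).foldl
    (fun params je =>
      if matched.contains je.1 && !(params.contains je.2.1) then
        params.insert je.2.1 je.2.2.2
      else params)
    PySem.Dict.empty).items

-- ===== PRECONDITION & SPEC =====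
def Spec_extract_search_parameters (query : String) (out : List (String × String)) : Prop := out = extract_search_parameters_alt query
instance (query : String) (out : List (String × String)) : Decidable (Spec_extract_search_parameters query out) := by unfold Spec_extract_search_parameters; infer_instance

-- ===== CLAIM (what is proved, stated in full; the proofs are below) =====
def Claim_equal_extract_search_parameters : Prop := ∀ (query : String), Dom_extract_search_parameters query → Spec_extract_search_parameters query (extract_search_parameters query)

-- ===== LEMMAS AND PROOFS =====

-- generic: membership in a set-accumulating fold
lemma pv_mem_foldl_iff {β : Type} (j : Int) (l : List β) (step : PySem.Set Int → β → PySem.Set Int)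
    (P : β → Prop) (h : ∀ m b, j ∈ step m b ↔ j ∈ m ∨ P b) (m : PySem.Set Int) :
    j ∈ l.foldl step m ↔ j ∈ m ∨ ∃ b ∈ l, P b := by
  induction l generalizing m with
  | nil => simp
  | cons b rest ih =>
      simp only [List.foldl_cons, ih, h, List.mem_cons]
      constructor
      · rintro ((hm | hb) | ⟨x, hx, hp⟩)
        · exact Or.inl hm
        · exact Or.inr ⟨b, Or.inl rfl, hb⟩
        · exact Or.inr ⟨x, Or.inr hx, hp⟩
      · rintro (hm | ⟨x, (rfl | hx), hp⟩)
        · exact Or.inl (Or.inl hm)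
        · exact Or.inl (Or.inr hp)
        · exact Or.inr ⟨x, hx, hp⟩

-- the scan contains j iff some window of q looks up to j in the index
lemma pv_mem_scan_iff (q : String) (j : Int) :
    j ∈ pvB_scan q ↔ ∃ i ∈ PySem.List.pyRange 0 (PySem.Str.len q) 1, ∃ L ∈ pvB_lengths,
      pvB_index.get? (PySem.Str.slice q (some i) (some (i + L))) = some j := by
  unfold pvB_scan
  rw [pv_mem_foldl_iff j _ _
    (fun i => ∃ L ∈ pvB_lengths,
      pvB_index.get? (PySem.Str.slice q (some i) (some (i + L))) = some j)
    (fun m i => by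
      rw [pv_mem_foldl_iff j _ _
        (fun L => pvB_index.get? (PySem.Str.slice q (some i) (some (i + L))) = some j)
        (fun m' L => by
          cases hg : pvB_index.get? (PySem.Str.slice q (some i) (some (i + L))) with
          | none => simp [hg]
          | some x => simp [hg, PySem.Set.mem_add, eq_comm])
        m])]
  simp [PySem.Set.empty]

-- the index characterization: get? s = some j iff (s, j) comes from the enumerated table
lemma pv_index_get? (s : String) (j : Int) :
    pvB_index.get? s = some j ↔
      (s, j) ∈ (PySem.List.enumerate pvB_table 0).map (fun je => (je.2.2.1, je.1)) := by
  have hitems : pvB_index.items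
      = (PySem.List.enumerate pvB_table 0).map (fun je => (je.2.2.1, je.1)) := by
    unfold pvB_index
    rw [PySem.Dict.items_foldl_insert_fresh (PySem.List.enumerate pvB_table 0)
      (fun (je : Int × (String × String × String)) => je.2.2.1)
      (fun (je : Int × (String × String × String)) => je.1) PySem.Dict.empty
      (by intro a _; simp) (by decide)]
    simp [show PySem.Dict.empty.items = ([] : List (String × Int)) from rfl]
  have hnodup : pvB_index.keys.Nodup := by
    simp only [PySem.Dict.keys, hitems]
    decide
  rw [PySem.Dict.get?_eq_some_iff_mem_items _ _ _ hnodup, hitems]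

-- window existence equals substring containment, for the table's keywords
set_option maxRecDepth 8192 in
lemma pv_window_iff_isIn (q kw : String) (hne : kw.toList ≠ [])
    (hlen : (PySem.Str.len kw) ∈ pvB_lengths) :
    (∃ i ∈ PySem.List.pyRange 0 (PySem.Str.len q) 1, ∃ L ∈ pvB_lengths,
        PySem.Str.slice q (some i) (some (i + L)) = kw) ↔ PySem.Str.isIn kw q = true := by
  rw [PySem.Str.isIn_iff_infix]
  constructor
  · rintro ⟨i, hi, L, hL, heq⟩
    rw [PySem.List.mem_pyRange_one] at hi
    have hLpos : ∀ L ∈ pvB_lengths, 0 < L := by decide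
    have hL0 : 0 < L := hLpos L hL
    have hlist := congrArg String.toList heq
    rw [PySem.Str.toList_slice,
      show PySem.Chars.slice q.toList (some i) (some (i + L))
        = PySem.List.slice q.toList (some i) (some (i + L)) from rfl,
      PySem.List.slice_toNat _ hi.1 (by omega)] at hlist
    rw [← hlist]
    exact ((List.take_prefix _ _).isInfix).trans ((List.drop_suffix _ _).isInfix)
  · intro hinf
    obtain ⟨s, t, hst⟩ := hinf
    have hkw : 0 < kw.toList.length := List.length_pos_of_ne_nil hne
    refine ⟨(s.length : Int), ?_, (kw.toList.length : Int), ?_, ?_⟩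
    · rw [PySem.List.mem_pyRange_one, PySem.Str.len_eq, ← hst]
      constructor
      · exact Int.natCast_nonneg _
      · simp only [List.length_append]
        push_cast
        omega
    · rw [← PySem.Str.len_eq]
      exact hlen
    · rw [← String.toList_inj, PySem.Str.toList_slice,
        show PySem.Chars.slice q.toList (some (s.length : Int))
            (some ((s.length : Int) + (kw.toList.length : Int)))
          = PySem.List.slice q.toList (some (s.length : Int))
            (some ((s.length : Int) + (kw.toList.length : Int))) from rfl,
        PySem.List.slice_natCast_add, ← hst, List.append_assoc, List.drop_left, List.take_left]

-- combined: for each table row, membership of its index in the scan = `kw in q`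
set_option maxRecDepth 8192 in
lemma pv_scan_contains (q : String) (je : Int × (String × String × String))
    (hje : je ∈ PySem.List.enumerate pvB_table 0) :
    (pvB_scan q).contains je.1 = PySem.Str.isIn je.2.2.1 q := by
  have htbl : ∀ e ∈ pvB_table, e.2.1.toList ≠ [] ∧ PySem.Str.len e.2.1 ∈ pvB_lengths := by decide
  obtain ⟨k, hk, hjeeq⟩ := (PySem.List.mem_enumerate_iff _ _ _).mp hje
  have hmem : je.2 ∈ pvB_table := by rw [hjeeq]; exact List.getElem_mem _
  have hwin := pv_window_iff_isIn q je.2.2.1 (htbl _ hmem).1 (htbl _ hmem).2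
  apply Bool.eq_iff_iff.mpr
  rw [PySem.Set.contains_iff, pv_mem_scan_iff, ← hwin]
  constructor
  · rintro ⟨i, hi, L, hL, hget⟩
    rw [pv_index_get?] at hget
    obtain ⟨je', hje', heq⟩ := List.mem_map.mp hget
    obtain ⟨k', hk', hje'eq⟩ := (PySem.List.mem_enumerate_iff _ _ _).mp hje'
    have hkk : k' = k := by
      have h1 : je'.1 = (k' : Int) := by rw [hje'eq]; simp
      have h2 : je.1 = (k : Int) := by rw [hjeeq]; simp
      have h3 := congrArg Prod.snd heq
      simp only at h3
      rw [h1, h2] at h3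
      exact_mod_cast h3
    have hje'je : je' = je := by subst hkk; rw [hje'eq, hjeeq]
    have h4 := congrArg Prod.fst heq
    simp only at h4
    rw [hje'je] at h4
    exact ⟨i, hi, L, hL, h4.symm⟩
  · rintro ⟨i, hi, L, hL, heq⟩
    refine ⟨i, hi, L, hL, ?_⟩
    rw [pv_index_get?]
    exact List.mem_map.mpr ⟨je, hje, by rw [heq]⟩

-- the per-field resolution value of phase 2
def pvB_groupRes (q : String) (f : String) (rs : List (String × String × String))
    (p : PySem.Dict String String) : PySem.Dict String String :=
  match rs.find? (fun e => PySem.Str.isIn e.2.1 q) with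
  | some e => p.insert f e.2.2
  | none => p

def pvB_step (q : String) (p : PySem.Dict String String) (e : String × String × String) :
    PySem.Dict String String :=
  if PySem.Str.isIn e.2.1 q && !(p.contains e.1) then p.insert e.1 e.2.2 else p

lemma pv_group_skip (q f : String) (rs : List (String × String × String))
    (hf : ∀ e ∈ rs, e.1 = f) (p : PySem.Dict String String) (hp : p.contains f = true) :
    rs.foldl (pvB_step q) p = p := by
  induction rs generalizing p with
  | nil => rfl
  | cons e rest ih =>
      have hef : e.1 = f := hf e (by simp)
      simp only [List.foldl_cons, pvB_step, hef, hp, Bool.not_true, Bool.and_false,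
        Bool.false_eq_true, if_false]
      exact ih (fun e he => hf e (by simp [he])) p hp

lemma pv_group_eq (q f : String) (rs : List (String × String × String))
    (hf : ∀ e ∈ rs, e.1 = f) (p : PySem.Dict String String) (hp : p.contains f = false) :
    rs.foldl (pvB_step q) p = pvB_groupRes q f rs p := by
  induction rs with
  | nil => rfl
  | cons e rest ih =>
      have hef : e.1 = f := hf e (by simp)
      have hrest : ∀ e' ∈ rest, e'.1 = f := fun e' he => hf e' (by simp [he])
      by_cases hk : PySem.Str.isIn e.2.1 q = true
      · have hfind : List.find? (fun e => PySem.Str.isIn e.2.1 q) (e :: rest) = some e :=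
          List.find?_cons_of_pos (by simpa using hk)
        simp only [List.foldl_cons, pvB_step, hef, hk, hp, Bool.not_false, Bool.and_true,
          if_true, pvB_groupRes, hfind]
        exact pv_group_skip q f rest hrest _ (PySem.Dict.contains_insert_self _ _ _)
      · simp only [Bool.not_eq_true] at hk
        have hfind : List.find? (fun e => PySem.Str.isIn e.2.1 q) (e :: rest)
            = List.find? (fun e => PySem.Str.isIn e.2.1 q) rest :=
          List.find?_cons_of_neg (by simpa using hk)
        simp only [List.foldl_cons, pvB_step, hef, hk, Bool.false_and, Bool.false_eq_true,
          if_false, pvB_groupRes, hfind]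
        exact ih hrest

lemma pv_contains_groupRes (q f f' : String) (h : f' ≠ f) (rs : List (String × String × String))
    (p : PySem.Dict String String) :
    (pvB_groupRes q f rs p).contains f' = p.contains f' := by
  unfold pvB_groupRes
  cases hfind : rs.find? (fun e => PySem.Str.isIn e.2.1 q) with
  | none => rfl
  | some e => simp [PySem.Dict.contains_insert, h]

-- A's stages in groupRes form
lemma pv_countryLoop_eq (cs : List String) (ql : String) (p : PySem.Dict String String) :
    pvA_countryLoop cs ql p
      = pvB_groupRes ql "country" (cs.map (fun c => ("country", c, pvTitle c))) p := by
  induction cs with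
  | nil => rfl
  | cons c rest ih =>
      by_cases h : PySem.Str.isIn c ql = true
      · have hfind : List.find? (fun e => PySem.Str.isIn e.2.1 ql)
            (("country", c, pvTitle c) :: rest.map (fun c => ("country", c, pvTitle c)))
            = some ("country", c, pvTitle c) := List.find?_cons_of_pos (by simpa using h)
        simp only [pvA_countryLoop, h, if_true, List.map_cons, pvB_groupRes, hfind]
      · simp only [Bool.not_eq_true] at h
        have hfind : List.find? (fun e => PySem.Str.isIn e.2.1 ql)
            (("country", c, pvTitle c) :: rest.map (fun c => ("country", c, pvTitle c)))
            = List.find? (fun e => PySem.Str.isIn e.2.1 ql) (rest.map (fun c => ("country", c, pvTitle c))) :=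
          List.find?_cons_of_neg (by simpa using h)
        simp only [pvA_countryLoop, h, Bool.false_eq_true, if_false, List.map_cons, pvB_groupRes, hfind]
        exact ih

lemma pv_ptLoop_eq (ps : List String) (ql : String) (p : PySem.Dict String String) :
    pvA_ptLoop ps ql p
      = pvB_groupRes ql "project_type" (ps.map (fun c => ("project_type", c, PySem.Str.upper c))) p := by
  induction ps with
  | nil => rfl
  | cons c rest ih =>
      by_cases h : PySem.Str.isIn c ql = true
      · have hfind : List.find? (fun e => PySem.Str.isIn e.2.1 ql)
            (("project_type", c, PySem.Str.upper c) :: rest.map (fun c => ("project_type", c, PySem.Str.upper c)))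
            = some ("project_type", c, PySem.Str.upper c) := List.find?_cons_of_pos (by simpa using h)
        simp only [pvA_ptLoop, h, if_true, List.map_cons, pvB_groupRes, hfind]
      · simp only [Bool.not_eq_true] at h
        have hfind : List.find? (fun e => PySem.Str.isIn e.2.1 ql)
            (("project_type", c, PySem.Str.upper c) :: rest.map (fun c => ("project_type", c, PySem.Str.upper c)))
            = List.find? (fun e => PySem.Str.isIn e.2.1 ql) (rest.map (fun c => ("project_type", c, PySem.Str.upper c))) :=
          List.find?_cons_of_neg (by simpa using h)
        simp only [pvA_ptLoop, h, Bool.false_eq_true, if_false, List.map_cons, pvB_groupRes, hfind]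
        exact ih


lemma pv_theme_eq (ql : String) (p : PySem.Dict String String) :
    pvB_groupRes ql "theme"
      ((["digital", "technology", "tech"].map (fun w => ("theme", w, "Digital skills")))
        ++ (["environment", "green", "climate"].map (fun w => ("theme", w, "Environment")))
        ++ (["inclusion", "inclusive", "disability"].map (fun w => ("theme", w, "Social inclusion")))) p
    = (if ["digital", "technology", "tech"].any (fun w => PySem.Str.isIn w ql) then
        p.insert "theme" "Digital skills"
      else if ["environment", "green", "climate"].any (fun w => PySem.Str.isIn w ql) then
        p.insert "theme" "Environment"
      else if ["inclusion", "inclusive", "disability"].any (fun w => PySem.Str.isIn w ql) then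
        p.insert "theme" "Social inclusion"
      else p) := by
  by_cases h1 : PySem.Str.isIn "digital" ql = true
  · simp only [pvB_groupRes, List.map_cons, List.map_nil, List.cons_append, List.nil_append, List.find?_cons, List.any_cons, List.any_nil, h1]
    simp
  · simp only [Bool.not_eq_true] at h1
    by_cases h2 : PySem.Str.isIn "technology" ql = true
    · simp only [pvB_groupRes, List.map_cons, List.map_nil, List.cons_append, List.nil_append, List.find?_cons, List.any_cons, List.any_nil, h1, h2]
      simp
    · simp only [Bool.not_eq_true] at h2
      by_cases h3 : PySem.Str.isIn "tech" ql = true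
      · simp only [pvB_groupRes, List.map_cons, List.map_nil, List.cons_append, List.nil_append, List.find?_cons, List.any_cons, List.any_nil, h1, h2, h3]
        simp
      · simp only [Bool.not_eq_true] at h3
        by_cases h4 : PySem.Str.isIn "environment" ql = true
        · simp only [pvB_groupRes, List.map_cons, List.map_nil, List.cons_append, List.nil_append, List.find?_cons, List.any_cons, List.any_nil, h1, h2, h3, h4]
          simp
        · simp only [Bool.not_eq_true] at h4
          by_cases h5 : PySem.Str.isIn "green" ql = true
          · simp only [pvB_groupRes, List.map_cons, List.map_nil, List.cons_append, List.nil_append, List.find?_cons, List.any_cons, List.any_nil, h1, h2, h3, h4, h5]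
            simp
          · simp only [Bool.not_eq_true] at h5
            by_cases h6 : PySem.Str.isIn "climate" ql = true
            · simp only [pvB_groupRes, List.map_cons, List.map_nil, List.cons_append, List.nil_append, List.find?_cons, List.any_cons, List.any_nil, h1, h2, h3, h4, h5, h6]
              simp
            · simp only [Bool.not_eq_true] at h6
              by_cases h7 : PySem.Str.isIn "inclusion" ql = true
              · simp only [pvB_groupRes, List.map_cons, List.map_nil, List.cons_append, List.nil_append, List.find?_cons, List.any_cons, List.any_nil, h1, h2, h3, h4, h5, h6, h7]
                simp
              · simp only [Bool.not_eq_true] at h7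
                by_cases h8 : PySem.Str.isIn "inclusive" ql = true
                · simp only [pvB_groupRes, List.map_cons, List.map_nil, List.cons_append, List.nil_append, List.find?_cons, List.any_cons, List.any_nil, h1, h2, h3, h4, h5, h6, h7, h8]
                  simp
                · simp only [Bool.not_eq_true] at h8
                  by_cases h9 : PySem.Str.isIn "disability" ql = true
                  · simp only [pvB_groupRes, List.map_cons, List.map_nil, List.cons_append, List.nil_append, List.find?_cons, List.any_cons, List.any_nil, h1, h2, h3, h4, h5, h6, h7, h8, h9]
                    simp
                  · simp only [Bool.not_eq_true] at h9
                    simp only [pvB_groupRes, List.map_cons, List.map_nil, List.cons_append, List.nil_append, List.find?_cons, List.any_cons, List.any_nil, h1, h2, h3, h4, h5, h6, h7, h8, h9]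
                    simp

lemma pv_target_eq (ql : String) (p : PySem.Dict String String) :
    pvB_groupRes ql "target_group"
      ((["youth worker", "trainer"].map (fun w => ("target_group", w, "Youth workers")))
        ++ [("target_group", "young people", "Young people")]
        ++ [("target_group", "teacher", "Teachers")]) p
    = (if ["youth worker", "trainer"].any (fun w => PySem.Str.isIn w ql) then
        p.insert "target_group" "Youth workers"
      else if PySem.Str.isIn "young people" ql then
        p.insert "target_group" "Young people"
      else if PySem.Str.isIn "teacher" ql then
        p.insert "target_group" "Teachers"
      else p) := by
  by_cases h1 : PySem.Str.isIn "youth worker" ql = true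
  · simp only [pvB_groupRes, List.map_cons, List.map_nil, List.cons_append, List.nil_append, List.find?_cons, List.any_cons, List.any_nil, h1]
    simp
  · simp only [Bool.not_eq_true] at h1
    by_cases h2 : PySem.Str.isIn "trainer" ql = true
    · simp only [pvB_groupRes, List.map_cons, List.map_nil, List.cons_append, List.nil_append, List.find?_cons, List.any_cons, List.any_nil, h1, h2]
      simp
    · simp only [Bool.not_eq_true] at h2
      by_cases h3 : PySem.Str.isIn "young people" ql = true
      · simp only [pvB_groupRes, List.map_cons, List.map_nil, List.cons_append, List.nil_append, List.find?_cons, List.any_cons, List.any_nil, h1, h2, h3]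
        simp
      · simp only [Bool.not_eq_true] at h3
        by_cases h4 : PySem.Str.isIn "teacher" ql = true
        · simp only [pvB_groupRes, List.map_cons, List.map_nil, List.cons_append, List.nil_append, List.find?_cons, List.any_cons, List.any_nil, h1, h2, h3, h4]
          simp
        · simp only [Bool.not_eq_true] at h4
          simp only [pvB_groupRes, List.map_cons, List.map_nil, List.cons_append, List.nil_append, List.find?_cons, List.any_cons, List.any_nil, h1, h2, h3, h4]
          simp

-- ===== VERDICT (by name: the statement is the Claim_ definition above) =====
theorem extract_search_parameters_spec : Claim_equal_extract_search_parameters := by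
  intro query _
  unfold Spec_extract_search_parameters extract_search_parameters extract_search_parameters_alt
  dsimp only
  set ql := PySem.Str.lower query
  set gC := (["germany", "france", "spain", "italy", "poland", "netherlands",
    "belgium", "greece", "portugal", "czech", "hungary", "sweden",
    "austria", "denmark", "finland", "ireland", "latvia", "lithuania",
    "luxembourg", "malta", "slovakia", "slovenia", "estonia", "croatia",
    "cyprus", "bulgaria", "romania"].map (fun c => ("country", c, pvTitle c))) with hgC
  set gP := (["ka152", "ka153", "ka154", "ka210", "ka220", "ka226"].map
    (fun p => ("project_type", p, PySem.Str.upper p))) with hgP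
  set gT := ((["digital", "technology", "tech"].map (fun w => ("theme", w, "Digital skills")))
    ++ (["environment", "green", "climate"].map (fun w => ("theme", w, "Environment")))
    ++ (["inclusion", "inclusive", "disability"].map (fun w => ("theme", w, "Social inclusion")))) with hgT
  set gG := ((["youth worker", "trainer"].map (fun w => ("target_group", w, "Youth workers")))
    ++ [("target_group", "young people", "Young people")]
    ++ [("target_group", "teacher", "Teachers")]) with hgG
  -- B side: replace the scan-set test by `kw in q`, drop the enumeration, split the table
  have hcongr : (PySem.List.enumerate pvB_table 0).foldl
      (fun params je =>
        if (pvB_scan ql).contains je.1 && !(params.contains je.2.1) then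
          params.insert je.2.1 je.2.2.2
        else params) PySem.Dict.empty
      = (PySem.List.enumerate pvB_table 0).foldl
          (fun params je => pvB_step ql params je.2) PySem.Dict.empty := by
    apply PySem.List.foldl_congr_mem
    intro acc je hje
    rw [pvB_step, pv_scan_contains ql je hje]
  have henum : (PySem.List.enumerate pvB_table 0).foldl
      (fun params je => pvB_step ql params je.2) PySem.Dict.empty
      = pvB_table.foldl (pvB_step ql) PySem.Dict.empty := by
    conv_rhs => rw [← PySem.List.map_snd_enumerate pvB_table 0]
    rw [List.foldl_map]
  have htab : pvB_table = gC ++ (gP ++ (gT ++ gG)) := by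
    rw [hgC, hgP, hgT, hgG]
    simp [pvB_table]
  have hfC : ∀ e ∈ gC, e.1 = "country" := by rw [hgC]; decide
  have hfP : ∀ e ∈ gP, e.1 = "project_type" := by rw [hgP]; decide
  have hfT : ∀ e ∈ gT, e.1 = "theme" := by rw [hgT]; decide
  have hfG : ∀ e ∈ gG, e.1 = "target_group" := by rw [hgG]; decide
  have hpC : (PySem.Dict.empty : PySem.Dict String String).contains "country" = false := by decide
  have hpP : (pvB_groupRes ql "country" gC PySem.Dict.empty).contains "project_type" = false := by
    rw [pv_contains_groupRes ql "country" "project_type" (by decide)]; decide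
  have hpT : (pvB_groupRes ql "project_type" gP
      (pvB_groupRes ql "country" gC PySem.Dict.empty)).contains "theme" = false := by
    rw [pv_contains_groupRes ql "project_type" "theme" (by decide),
      pv_contains_groupRes ql "country" "theme" (by decide)]; decide
  have hpG : (pvB_groupRes ql "theme" gT (pvB_groupRes ql "project_type" gP
      (pvB_groupRes ql "country" gC PySem.Dict.empty))).contains "target_group" = false := by
    rw [pv_contains_groupRes ql "theme" "target_group" (by decide),
      pv_contains_groupRes ql "project_type" "target_group" (by decide),
      pv_contains_groupRes ql "country" "target_group" (by decide)]; decide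
  rw [hcongr, henum, htab, List.foldl_append, List.foldl_append, List.foldl_append,
    pv_group_eq ql "country" gC hfC PySem.Dict.empty hpC,
    pv_group_eq ql "project_type" gP hfP _ hpP,
    pv_group_eq ql "theme" gT hfT _ hpT,
    pv_group_eq ql "target_group" gG hfG _ hpG]
  -- A side: the four stages in groupRes form
  rw [pv_countryLoop_eq pvA_countries ql PySem.Dict.empty,
    pv_ptLoop_eq pvA_projectTypes ql _]
  rw [show pvA_countries.map (fun c => ("country", c, pvTitle c)) = gC from by rw [hgC]; rfl,
    show pvA_projectTypes.map (fun c => ("project_type", c, PySem.Str.upper c)) = gP from by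
      rw [hgP]; rfl]
  rw [← pv_theme_eq ql, ← pv_target_eq ql, ← hgT, ← hgG]
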